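-- pv_equiv track=rewrite | github.com/bilal-najar/Cryptarithmetic | implementation.py | numDigits
-- ===== SOURCE A (Python) =====
-- def numDigits(equation):
--     width = len(equation[-1])
--     result = 0
--
--     for digit in range(1, width+1):
--         numerated = True
--         for word in equation:
--             if len(word) >= digit and (not word[-digit].isdigit()):
--                 numerated = False
--                 break
--         if not numerated:
--             break
--
--         result += 1
--
--     return result
-- ===== SOURCE B (Python) =====
-- def numDigits(equation):
--     width = len(equation[-1])
--     best = width
--     for word in equation:
--         run = 0
--         for ch in reversed(word):
--             if not ch.isdigit():
--                 break
--             run += 1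
--         if run < len(word) and run < best:
--             best = run
--     return best
-- ===== Notes on version B (the rewrite author's own statement) =====
-- stated objective: alternative
-- what changed: Replaced A's column-wise scan (for each digit position, re-scan every word with an early break) by one pass per word computing its trailing-digit-run length and a single min reduction capped at the last word's length.
import Mathlib
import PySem

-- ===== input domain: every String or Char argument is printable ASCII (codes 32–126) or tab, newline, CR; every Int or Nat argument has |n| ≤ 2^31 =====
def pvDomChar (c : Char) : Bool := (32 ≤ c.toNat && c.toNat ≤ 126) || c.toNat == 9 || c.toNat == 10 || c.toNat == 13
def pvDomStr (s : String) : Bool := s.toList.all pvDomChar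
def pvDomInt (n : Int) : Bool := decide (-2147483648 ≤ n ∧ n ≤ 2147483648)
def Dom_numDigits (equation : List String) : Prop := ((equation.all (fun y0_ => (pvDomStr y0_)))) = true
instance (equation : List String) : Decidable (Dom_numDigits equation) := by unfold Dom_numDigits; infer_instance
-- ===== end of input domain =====

-- B replaces A's column-wise cross-word scan by a per-word trailing-digit-run computation
-- followed by a single min reduction (objective: alternative algorithm, same result).

-- ===== PORT A =====
-- inner `for word in equation: if len(word) >= digit and not word[-digit].isdigit(): break`
def pvACheck (digit : Nat) : List String → Bool
  | [] => true
  | w :: ws =>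
      if (decide (digit ≤ w.toList.length)) &&
         !((PySem.Str.pyGet? w (-(digit : Int))).elim true PySem.Chars.isdigit)
      then false
      else pvACheck digit ws

-- outer `for digit in range(1, width+1): … result += 1` with early break
def pvAGo (equation : List String) : List Nat → Int → Int
  | [], result => result
  | d :: ds, result =>
      if pvACheck d equation then pvAGo equation ds (result + 1) else result

def numDigits (equation : List String) : Int :=
  let width := ((PySem.List.pyGet? equation (-1)).getD "").toList.length
  pvAGo equation (List.range' 1 width) 0

-- ===== PORT B =====
-- `for ch in reversed(word): if not ch.isdigit(): break; run += 1` = leading-digit count of the reversed word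
def pvRun : List Char → Nat
  | [] => 0
  | c :: t => if PySem.Chars.isdigit c then pvRun t + 1 else 0

def numDigits_alt (equation : List String) : Int :=
  let width := ((PySem.List.pyGet? equation (-1)).getD "").toList.length
  ((equation.foldl (fun best w =>
      let run := pvRun w.toList.reverse
      if run < w.toList.length ∧ run < best then run else best) width : Nat) : Int)

-- ===== PRECONDITION & SPEC =====
-- Pre_ excludes only the empty list, on which Python A raises IndexError (equation[-1]).
def Pre_numDigits (equation : List String) : Prop := equation ≠ []
instance (equation : List String) : Decidable (Pre_numDigits equation) := by unfold Pre_numDigits; infer_instance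
def pvWitness_numDigits : List String := ["ab12", "3+90"]

def Spec_numDigits (equation : List String) (out : Int) : Prop := out = numDigits_alt equation
instance (equation : List String) (out : Int) : Decidable (Spec_numDigits equation out) := by unfold Spec_numDigits; infer_instance

-- ===== CLAIM (what is proved, stated in full; the proofs are below) =====
def Claim_equal_numDigits : Prop := ∀ (equation : List String), Dom_numDigits equation → Pre_numDigits equation → Spec_numDigits equation (numDigits equation)

-- ===== LEMMAS AND PROOFS =====

theorem pvRun_le (cs : List Char) : pvRun cs ≤ cs.length := by
  induction cs with
  | nil => simp [pvRun]
  | cons c t ih => simp only [pvRun, List.length_cons]; split <;> omega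

theorem pvRun_digit (cs : List Char) (i : Nat) (h : i < pvRun cs) :
    cs[i]?.map PySem.Chars.isdigit = some true := by
  induction cs generalizing i with
  | nil => simp [pvRun] at h
  | cons c t ih =>
      simp only [pvRun] at h
      split at h
      · cases i with
        | zero => simpa
        | succ j => simpa using ih j (by omega)
      · omega

theorem pvRun_stop (cs : List Char) (h : pvRun cs < cs.length) :
    cs[pvRun cs]?.map PySem.Chars.isdigit = some false := by
  induction cs with
  | nil => simp at h
  | cons c t ih =>
      by_cases hd : PySem.Chars.isdigit c = true
      · simp only [pvRun, hd, if_true, List.length_cons] at h ⊢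
        simpa using ih (by omega)
      · simp only [pvRun, hd, if_false, Bool.false_eq_true] at h ⊢
        simp [Bool.eq_false_iff.mpr hd]

-- the head test of A's inner loop, characterised via the reversed word
theorem pvHead_iff (w : String) (d : Nat) (hd : 1 ≤ d) :
    ((decide (d ≤ w.toList.length)) &&
        !((PySem.Str.pyGet? w (-(d : Int))).elim true PySem.Chars.isdigit)) = false
      ↔ (d ≤ w.toList.length →
          (w.toList.reverse[d-1]?).map PySem.Chars.isdigit = some true) := by
  by_cases hlen : d ≤ w.toList.length
  · have hget : PySem.Str.pyGet? w (-(d : Int)) = w.toList[w.toList.length - d]? := by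
      simpa using PySem.List.pyGet?_neg_natCast (xs := w.toList) (k := d) (by omega) hlen
    have hidx : w.toList.length - d < w.toList.length := by omega
    have hrev : w.toList.reverse[d-1]? = w.toList[w.toList.length - d]? := by
      rw [List.getElem?_reverse (by omega)]
      congr 1; omega
    rw [hget, hrev, List.getElem?_eq_getElem hidx]
    cases hdc : PySem.Chars.isdigit (w.toList[w.toList.length - d]) <;>
      simp
  · have hlen' : ¬ d ≤ w.length := by simpa using hlen
    simp [hlen']

-- characterisation of A's inner loop
theorem pvACheck_iff (eq : List String) (d : Nat) (hd : 1 ≤ d) :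
    pvACheck d eq = true ↔
      ∀ w ∈ eq, d ≤ w.toList.length →
        (w.toList.reverse[d-1]?).map PySem.Chars.isdigit = some true := by
  induction eq with
  | nil => simp [pvACheck]
  | cons w ws ih =>
      simp only [pvACheck]
      cases hc : ((decide (d ≤ w.toList.length)) &&
          !((PySem.Str.pyGet? w (-(d : Int))).elim true PySem.Chars.isdigit)) with
      | true =>
          simp only [if_true, Bool.false_eq_true, false_iff]
          intro hall
          have := (pvHead_iff w d hd).mpr (hall w (by simp))
          rw [hc] at this
          exact absurd this (by decide)
      | false =>
          simp only [Bool.false_eq_true, if_false, ih, List.forall_mem_cons]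
          have hh := (pvHead_iff w d hd).mp hc
          tauto

-- A's outer loop counts the leading digits satisfying pvACheck
theorem pvAGo_takeWhile (eq : List String) (ds : List Nat) (acc : Int) :
    pvAGo eq ds acc = acc + ((ds.takeWhile (fun d => pvACheck d eq)).length : Int) := by
  induction ds generalizing acc with
  | nil => simp [pvAGo]
  | cons d t ih =>
      simp only [pvAGo, List.takeWhile]
      cases h : pvACheck d eq with
      | true => rw [ih]; simp; ring
      | false => simp

-- length of takeWhile on a run of consecutive naturals
theorem tw_range' (P : Nat → Bool) (s w m : Nat) (hm : m ≤ w)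
    (hall : ∀ i, i < m → P (s + i) = true)
    (hstop : m < w → P (s + m) = false) :
    ((List.range' s w).takeWhile P).length = m := by
  induction w generalizing s m with
  | zero =>
      have : m = 0 := by omega
      subst this; simp
  | succ n ih =>
      rw [List.range'_succ]
      cases m with
      | zero =>
          have hs : P s = false := by simpa using hstop (by omega)
          simp [List.takeWhile, hs]
      | succ m' =>
          have hs : P s = true := by simpa using hall 0 (by omega)
          simp only [List.takeWhile, hs, List.length_cons]
          rw [ih (s+1) m' (by omega)
            (fun i hi => by
              have := hall (i+1) (by omega)
              simpa [Nat.add_assoc, Nat.add_comm 1 i] using this)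
            (fun hlt => by
              have := hstop (by omega)
              simpa [Nat.add_assoc, Nat.add_comm 1 m'] using this)]

-- facts about B's fold
def pvFoldB (init : Nat) (eq : List String) : Nat :=
  eq.foldl (fun best w =>
    let run := pvRun w.toList.reverse
    if run < w.toList.length ∧ run < best then run else best) init

theorem pvFoldB_le (init : Nat) (eq : List String) : pvFoldB init eq ≤ init := by
  induction eq generalizing init with
  | nil => simp [pvFoldB]
  | cons w ws ih =>
      simp only [pvFoldB, List.foldl_cons]
      split
      · next h => exact le_trans (ih _) (by omega)
      · exact ih _

theorem pvFoldB_le_run (init : Nat) (eq : List String) (w : String) (hw : w ∈ eq)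
    (hb : pvRun w.toList.reverse < w.toList.length) :
    pvFoldB init eq ≤ pvRun w.toList.reverse := by
  induction eq generalizing init with
  | nil => simp at hw
  | cons x xs ih =>
      rcases List.mem_cons.mp hw with rfl | hm
      · simp only [pvFoldB, List.foldl_cons]
        split
        · exact pvFoldB_le _ _
        · next h =>
            have : init ≤ pvRun w.toList.reverse := by
              rcases not_and_or.mp h with h1 | h2
              · exact absurd hb h1
              · omega
            exact le_trans (pvFoldB_le _ _) this
      · simp only [pvFoldB, List.foldl_cons]
        exact ih _ hm

theorem pvFoldB_cases (init : Nat) (eq : List String) :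
    pvFoldB init eq = init ∨
      ∃ w ∈ eq, pvRun w.toList.reverse < w.toList.length ∧
        pvFoldB init eq = pvRun w.toList.reverse := by
  induction eq generalizing init with
  | nil => left; simp [pvFoldB]
  | cons x xs ih =>
      simp only [pvFoldB, List.foldl_cons]
      split
      · next h =>
          rcases ih (pvRun x.toList.reverse) with h1 | ⟨w, hw, hb, he⟩
          · right; exact ⟨x, by simp, h.1, h1⟩
          · right; exact ⟨w, by simp [hw], hb, he⟩
      · rcases ih init with h1 | ⟨w, hw, hb, he⟩
        · left; exact h1
        · right; exact ⟨w, by simp [hw], hb, he⟩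

-- ===== VERDICT (by name: the statement is the Claim_ definition above) =====
theorem numDigits_spec : Claim_equal_numDigits := by
  intro eq _ _
  show numDigits eq = numDigits_alt eq
  show pvAGo eq (List.range' 1 (((PySem.List.pyGet? eq (-1)).getD "").toList.length)) 0
      = ((pvFoldB (((PySem.List.pyGet? eq (-1)).getD "").toList.length) eq : Nat) : Int)
  set width := ((PySem.List.pyGet? eq (-1)).getD "").toList.length with hwdef
  rw [pvAGo_takeWhile]
  have hble := pvFoldB_le width eq
  have hlen : ((List.range' 1 width).takeWhile (fun d => pvACheck d eq)).length
      = pvFoldB width eq := by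
    apply tw_range' _ 1 width _ hble
    · intro i hi
      rw [pvACheck_iff eq (1+i) (by omega)]
      intro w hwmem hlenw
      have hrle := pvRun_le w.toList.reverse
      simp only [List.length_reverse] at hrle
      have hrun : i < pvRun w.toList.reverse := by
        by_cases hb : pvRun w.toList.reverse < w.toList.length
        · have := pvFoldB_le_run width eq w hwmem hb; omega
        · omega
      have hdig := pvRun_digit w.toList.reverse i hrun
      rw [show 1 + i - 1 = i by omega]
      exact hdig
    · intro hlt
      rcases pvFoldB_cases width eq with h1 | ⟨w, hwmem, hb, he⟩
      · omega
      · rw [Bool.eq_false_iff]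
        rw [Ne, pvACheck_iff eq (1 + pvFoldB width eq) (by omega)]
        intro hall
        have h1 : 1 + pvFoldB width eq ≤ w.toList.length := by omega
        have hbad := hall w hwmem h1
        rw [show 1 + pvFoldB width eq - 1 = pvFoldB width eq by omega, he] at hbad
        have hstop := pvRun_stop w.toList.reverse (by simpa using hb)
        rw [hstop] at hbad
        simp at hbad
  rw [hlen]
  ring
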